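-- pv_equiv track=rewrite | github.com/ellepsis/pythonLabs | Lab1/lab1.py | fx
-- ===== SOURCE A (Python) =====
-- def fx(words):
--     list_x = []
--     list_non_x = []
--     for word in words:
--         if word.startswith('x'):
--             list_x.append(word)
--         else:
--             list_non_x.append(word)
--     list_non_x.sort()
--     list_x.sort()
--     list_x.extend(list_non_x)
--     return list_x
-- ===== SOURCE B (Python) =====
-- def fx(words):
--     return sorted(words, key=lambda w: (not w.startswith('x'), w))
-- ===== Notes on version B (the rewrite author's own statement) =====
-- stated objective: idiomatic
-- what changed: Replaces A's explicit two-bucket partition loop plus two separate in-place sorts and an extend with a single sorted() call keyed on (not w.startswith('x'), w).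
import Mathlib
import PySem

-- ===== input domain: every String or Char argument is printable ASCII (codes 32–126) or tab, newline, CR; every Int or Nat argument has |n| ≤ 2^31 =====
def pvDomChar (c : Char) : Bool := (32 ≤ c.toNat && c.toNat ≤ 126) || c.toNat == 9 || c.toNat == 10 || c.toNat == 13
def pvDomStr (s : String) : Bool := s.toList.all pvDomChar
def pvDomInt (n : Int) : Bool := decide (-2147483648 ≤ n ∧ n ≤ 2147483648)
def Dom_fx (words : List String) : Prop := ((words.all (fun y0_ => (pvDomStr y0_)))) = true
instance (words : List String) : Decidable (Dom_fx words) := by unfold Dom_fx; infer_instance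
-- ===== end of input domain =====

-- B replaces A's partition-into-two-buckets loop + two separate sorts + extend
-- with one sorted() call keyed on (not startswith('x'), word); same result, proved equal.

-- ===== PORT A =====
def fx (words : List String) : List String :=
  let p := words.foldl
    (fun (acc : List String × List String) word =>
      if PySem.Str.startswith word "x" then (acc.1 ++ [word], acc.2) else (acc.1, acc.2 ++ [word]))
    ([], [])
  let list_non_x := PySem.List.sorted p.2 (fun x => x) false
  let list_x := PySem.List.sorted p.1 (fun x => x) false
  list_x ++ list_non_x

-- ===== PORT B =====
def fx_alt (words : List String) : List String :=
  PySem.List.sorted2 words (fun w => !(PySem.Str.startswith w "x")) (fun w => w) false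

-- ===== PRECONDITION & SPEC =====
def Spec_fx (words : List String) (out : List String) : Prop := out = fx_alt words
instance (words : List String) (out : List String) : Decidable (Spec_fx words out) := by unfold Spec_fx; infer_instance

-- ===== CLAIM (what is proved, stated in full; the proofs are below) =====
def Claim_equal_fx : Prop := ∀ (words : List String), Dom_fx words → Spec_fx words (fx words)

-- ===== LEMMAS AND PROOFS =====

theorem pv_insertBy_congr {α : Type} (b1 b2 : α → α → Bool) (w : α) (B : List α)
    (h : ∀ y ∈ B, b1 w y = b2 w y) :
    PySem.List.insertBy b1 w B = PySem.List.insertBy b2 w B := by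
  induction B with
  | nil => rfl
  | cons y ys ih =>
      simp only [PySem.List.insertBy, h y (by simp)]
      by_cases hb : b2 w y = true
      · simp [hb]
      · simp [hb, ih (fun z hz => h z (by simp [hz]))]

theorem pv_insertBy_append_left {α : Type} (b1 b2 : α → α → Bool) (w : α) (A B : List α)
    (h1 : ∀ y ∈ A, b1 w y = b2 w y) (h2 : ∀ y ∈ B, b1 w y = true) :
    PySem.List.insertBy b1 w (A ++ B) = PySem.List.insertBy b2 w A ++ B := by
  induction A with
  | nil =>
      cases B with
      | nil => rfl
      | cons y ys => simp [PySem.List.insertBy, h2 y (by simp)]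
  | cons a as ih =>
      simp only [List.cons_append, PySem.List.insertBy, h1 a (by simp)]
      by_cases hb : b2 w a = true
      · simp [hb]
      · simp [hb, ih (fun z hz => h1 z (by simp [hz]))]

theorem pv_insertBy_append_right {α : Type} (b1 b2 : α → α → Bool) (w : α) (A B : List α)
    (hA : ∀ y ∈ A, b1 w y = false) (hB : ∀ y ∈ B, b1 w y = b2 w y) :
    PySem.List.insertBy b1 w (A ++ B) = A ++ PySem.List.insertBy b2 w B := by
  induction A with
  | nil => simpa using pv_insertBy_congr b1 b2 w B hB
  | cons a as ih =>
      simp only [List.cons_append, PySem.List.insertBy, hA a (by simp)]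
      simp [ih (fun z hz => hA z (by simp [hz]))]

theorem pv_foldl_part (ws : List String) (a b : List String) :
    ws.foldl
      (fun (acc : List String × List String) word =>
        if PySem.Str.startswith word "x" then (acc.1 ++ [word], acc.2) else (acc.1, acc.2 ++ [word]))
      (a, b)
    = (a ++ ws.filter (fun w => PySem.Str.startswith w "x"),
       b ++ ws.filter (fun w => !PySem.Str.startswith w "x")) := by
  induction ws generalizing a b with
  | nil => simp
  | cons w ws ih =>
      rw [List.foldl_cons, List.filter_cons, List.filter_cons]
      by_cases h : PySem.Str.startswith w "x" = true
      · rw [if_pos h, ih]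
        simp only [h, Bool.not_true, Bool.false_eq_true, if_neg (by simp : ¬(false = true))]
        simp
      · have h2 : PySem.Str.startswith w "x" = false := Bool.eq_false_iff.mpr h
        rw [if_neg h, ih]
        simp only [h2, Bool.not_false, if_neg (by simp : ¬(false = true))]
        simp

theorem pv_main (ws : List String) :
    PySem.List.sorted2 ws (fun w => !(PySem.Str.startswith w "x")) (fun w => w) false
    = PySem.List.sorted (ws.filter (fun w => PySem.Str.startswith w "x")) (fun x => x) false
      ++ PySem.List.sorted (ws.filter (fun w => !PySem.Str.startswith w "x")) (fun x => x) false := by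
  induction ws using List.reverseRecOn with
  | nil => rfl
  | append_singleton ws w ih =>
      simp only [PySem.List.sorted2] at ih ⊢
      simp only [if_neg (by simp : ¬(false = true))] at ih ⊢
      rw [List.foldl_append, List.foldl_cons, List.foldl_nil, ih]
      by_cases hw : PySem.Str.startswith w "x" = true
      · have hw' : PySem.Chars.startswith w.toList ['x'] = true := by simpa using hw
        have e1 : List.filter (fun w => PySem.Str.startswith w "x") (ws ++ [w])
            = List.filter (fun w => PySem.Str.startswith w "x") ws ++ [w] := by
          simp [hw']
        have e2 : List.filter (fun w => !PySem.Str.startswith w "x") (ws ++ [w])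
            = List.filter (fun w => !PySem.Str.startswith w "x") ws := by
          simp [hw']
        rw [e1, e2,
            PySem.List.sorted_eq_foldl_insertBy
              (List.filter (fun w => PySem.Str.startswith w "x") ws ++ [w]),
            List.foldl_append, List.foldl_cons, List.foldl_nil,
            ← PySem.List.sorted_eq_foldl_insertBy]
        exact pv_insertBy_append_left _ _ w _ _
          (fun y hy => by
            have hy' : PySem.Str.startswith y "x" = true := by
              have := (PySem.List.mem_sorted _ _ _ y).mp hy
              simpa using (List.mem_filter.mp this).2
            simp only [hw, hy']
            simp)
          (fun y hy => by
            have hy' : PySem.Str.startswith y "x" = false := by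
              have := (PySem.List.mem_sorted _ _ _ y).mp hy
              simpa using (List.mem_filter.mp this).2
            simp only [hw, hy']
            simp)
      · have hw2 : PySem.Str.startswith w "x" = false := Bool.eq_false_iff.mpr hw
        have hw2' : PySem.Chars.startswith w.toList ['x'] = false := by simpa using hw2
        have e1 : List.filter (fun w => PySem.Str.startswith w "x") (ws ++ [w])
            = List.filter (fun w => PySem.Str.startswith w "x") ws := by
          simp [hw2']
        have e2 : List.filter (fun w => !PySem.Str.startswith w "x") (ws ++ [w])
            = List.filter (fun w => !PySem.Str.startswith w "x") ws ++ [w] := by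
          simp [hw2']
        rw [e1, e2,
            PySem.List.sorted_eq_foldl_insertBy
              (List.filter (fun w => !PySem.Str.startswith w "x") ws ++ [w]),
            List.foldl_append, List.foldl_cons, List.foldl_nil,
            ← PySem.List.sorted_eq_foldl_insertBy]
        exact pv_insertBy_append_right _ _ w _ _
          (fun y hy => by
            have hy' : PySem.Str.startswith y "x" = true := by
              have := (PySem.List.mem_sorted _ _ _ y).mp hy
              simpa using (List.mem_filter.mp this).2
            simp only [hw2, hy']
            simp)
          (fun y hy => by
            have hy' : PySem.Str.startswith y "x" = false := by
              have := (PySem.List.mem_sorted _ _ _ y).mp hy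
              simpa using (List.mem_filter.mp this).2
            simp only [hw2, hy']
            simp)

-- ===== VERDICT (by name: the statement is the Claim_ definition above) =====
theorem fx_spec : Claim_equal_fx := by
  intro words _
  unfold Spec_fx fx fx_alt
  rw [pv_foldl_part words [] []]
  simp only [List.nil_append]
  exact (pv_main words).symm
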